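-- pv_equiv track=rewrite | github.com/maomaotfntfn/DEERE | metric.py | agg_ins_event_role_tpfpfn_stats
-- ===== SOURCE A (Python) =====
-- def agg_event_role_tpfpfn_stats(pred_records, gold_records, role_num):
--     """
--     Aggregate TP,FP,FN statistics for a single event prediction of one instance.
--     A pred_records should be formated as
--     [(Record Index)
--         ((Role Index)
--             argument 1, ...
--         ), ...
--     ], where argument 1 should support the '=' operation and the empty argument is None.
--     """
--     role_tpfpfn_stats = [[0] * 3 for _ in range(role_num)]
--
--     if gold_records is None:
--         if pred_records is not None:  # FP
--             for pred_record in pred_records: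
--                 assert len(pred_record) == role_num
--                 for role_idx, arg_tup in enumerate(pred_record):
--                     if arg_tup is not None:
--                         role_tpfpfn_stats[role_idx][1] += 1
--         else:  # ignore TN
--             pass
--     else:
--         if pred_records is None:  # FN
--             for gold_record in gold_records:
--                 assert len(gold_record) == role_num
--                 for role_idx, arg_tup in enumerate(gold_record):
--                     if arg_tup is not None:
--                         role_tpfpfn_stats[role_idx][2] += 1
--         else:  # True Positive at the event level
--             # sort predicted event records by the non-empty count
--             # to remove the impact of the record order on evaluation
--             pred_records = sorted(pred_records,
--                                   key=lambda x: sum(1 for a in x if a is not None),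
--                                   reverse=True)
--             gold_records = list(gold_records)
--
--             while len(pred_records) > 0 and len(gold_records) > 0:
--                 pred_record = pred_records[0]
--                 assert len(pred_record) == role_num
--
--                 # pick the most similar gold record
--                 _tmp_key = lambda gr: sum([1 for pa, ga in zip(pred_record, gr) if pa == ga])
--                 best_gr_idx = gold_records.index(max(gold_records, key=_tmp_key))
--                 gold_record = gold_records[best_gr_idx]
--
--                 for role_idx, (pred_arg, gold_arg) in enumerate(zip(pred_record, gold_record)):
--                     if gold_arg is None:
--                         if pred_arg is not None:  # FP at the role level
--                             role_tpfpfn_stats[role_idx][1] += 1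
--                         else:  # ignore TN
--                             pass
--                     else:
--                         if pred_arg is None:  # FN
--                             role_tpfpfn_stats[role_idx][2] += 1
--                         else:
--                             if pred_arg == gold_arg:  # TP
--                                 role_tpfpfn_stats[role_idx][0] += 1
--                             else:
--                                 role_tpfpfn_stats[role_idx][1] += 1
--                                 role_tpfpfn_stats[role_idx][2] += 1
--
--                 del pred_records[0]
--                 del gold_records[best_gr_idx]
--
--             # remaining FP
--             for pred_record in pred_records:
--                 assert len(pred_record) == role_num
--                 for role_idx, arg_tup in enumerate(pred_record):
--                     if arg_tup is not None:
--                         role_tpfpfn_stats[role_idx][1] += 1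
--             # remaining FN
--             for gold_record in gold_records:
--                 assert len(gold_record) == role_num
--                 for role_idx, arg_tup in enumerate(gold_record):
--                     if arg_tup is not None:
--                         role_tpfpfn_stats[role_idx][2] += 1
--
--     return role_tpfpfn_stats
--
-- def agg_ins_event_role_tpfpfn_stats(pred_record_mat, gold_record_mat, event_role_num_list):
--     """
--     Aggregate TP,FP,FN statistics for a single instance.
--     A record_mat should be formated as
--     [(Event Index)
--         [(Record Index)
--             ((Role Index)
--                 argument 1, ...
--             ), ...
--         ], ...
--     ], where argument 1 should support the '=' operation and the empty argument is None.
--     """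
--     assert len(pred_record_mat) == len(gold_record_mat)
--     # tpfpfn_stat: TP, FP, FN
--     event_role_tpfpfn_stats = []
--     for event_idx, (pred_records, gold_records) in enumerate(zip(pred_record_mat, gold_record_mat)):
--         role_num = event_role_num_list[event_idx]
--         role_tpfpfn_stats = agg_event_role_tpfpfn_stats(pred_records, gold_records, role_num)
--         event_role_tpfpfn_stats.append(role_tpfpfn_stats)
--
--     return event_role_tpfpfn_stats
-- ===== SOURCE B (Python) =====
-- def _cell(pa, ga):
--     # [tp, fp, fn] contribution of a single (pred_arg, gold_arg) pair
--     tp = 1 if (pa is not None and pa == ga) else 0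
--     fp = 1 if (pa is not None and pa != ga) else 0
--     fn = 1 if (ga is not None and pa != ga) else 0
--     return [tp, fp, fn]
--
-- def _greedy_pairs(preds, golds, k):
--     """Greedy matching only: (pred, gold) pairs; an unmatched record is paired
--     with an all-None blank record so counting needs no special cases."""
--     blank = [None] * k
--     golds = list(golds) if golds is not None else []
--     pairs = []
--     for p in sorted(preds if preds is not None else [],
--                     key=lambda rec: sum(1 for a in rec if a is not None),
--                     reverse=True):
--         if golds:
--             j = max(range(len(golds)),
--                     key=lambda i: sum(1 for pa, ga in zip(p, golds[i]) if pa == ga))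
--             pairs.append((p, golds[j]))
--             golds = golds[:j] + golds[j + 1:]
--         else:
--             pairs.append((p, blank))
--     return pairs + [(blank, g) for g in golds]
--
-- def agg_ins_event_role_tpfpfn_stats(pred_record_mat, gold_record_mat, event_role_num_list):
--     assert len(pred_record_mat) == len(gold_record_mat)
--     out = []
--     for i, (preds, golds) in enumerate(zip(pred_record_mat, gold_record_mat)):
--         k = event_role_num_list[i]
--         pairs = _greedy_pairs(preds, golds, k)
--         out.append([[sum(_cell(p[r], g[r])[j] for p, g in pairs) for j in range(3)]
--                     for r in range(k)])
--     return out
-- ===== Notes on version B (the rewrite author's own statement) =====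
-- stated objective: alternative
-- what changed: B replaces A's incremental mutation of a per-role stats matrix by a pure two-phase pipeline: a single fold over the sorted preds builds explicit (pred, gold) pairs (first-argmax gold picked by max over index range, every unmatched record on either side padded with a blank all-None record), and the result is then a nested comprehension summing a 3-vector cell function per role and per column; the top level is an enumerate-comprehension instead of an accumulator loop, and the None/None cases need no special branches.
-- outside the precondition, e.g. on agg_ins_event_role_tpfpfn_stats([[['a']]], [[[]]], [1]): A returns [[[0, 0, 0]]], B raises IndexError
import Mathlib
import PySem

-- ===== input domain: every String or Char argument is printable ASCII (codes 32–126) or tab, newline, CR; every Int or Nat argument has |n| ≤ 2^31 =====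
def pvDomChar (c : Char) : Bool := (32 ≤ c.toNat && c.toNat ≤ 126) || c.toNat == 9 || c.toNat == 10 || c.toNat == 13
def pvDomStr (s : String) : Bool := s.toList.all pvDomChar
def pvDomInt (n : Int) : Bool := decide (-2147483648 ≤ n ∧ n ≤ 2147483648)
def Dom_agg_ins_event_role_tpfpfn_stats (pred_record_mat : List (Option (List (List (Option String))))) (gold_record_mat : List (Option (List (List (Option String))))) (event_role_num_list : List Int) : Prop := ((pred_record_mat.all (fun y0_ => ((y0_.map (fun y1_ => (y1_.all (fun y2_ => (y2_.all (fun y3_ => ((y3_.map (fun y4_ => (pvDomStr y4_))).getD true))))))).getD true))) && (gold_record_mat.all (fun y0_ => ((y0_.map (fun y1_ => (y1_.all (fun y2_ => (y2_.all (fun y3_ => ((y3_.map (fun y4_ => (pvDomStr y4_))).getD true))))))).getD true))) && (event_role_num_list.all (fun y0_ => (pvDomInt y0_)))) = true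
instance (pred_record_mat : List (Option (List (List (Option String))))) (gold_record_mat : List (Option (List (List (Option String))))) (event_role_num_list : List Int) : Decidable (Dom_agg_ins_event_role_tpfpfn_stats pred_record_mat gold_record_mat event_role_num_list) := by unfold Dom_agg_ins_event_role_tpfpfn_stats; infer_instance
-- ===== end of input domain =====

-- B turns A's incremental mutation of a stats matrix into a pure pipeline: one fold
-- builds explicit (pred, gold) pairs (unmatched records padded with a blank all-None
-- record), and the matrix is a nested comprehension of per-role per-column sums of a
-- 3-vector cell function; same return value on Pre_.

-- ===== PORT A =====
-- sum(1 for a in x if a is not None)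
def pvNonNone (x : List (Option String)) : Int :=
  ((x.filter (fun a => a.isSome)).length : Int)

-- sum([1 for pa, ga in zip(pred_record, gr) if pa == ga])
def pvSim (p g : List (Option String)) : Int :=
  (((p.zip g).filter (fun pg => decide (pg.1 = pg.2))).length : Int)

-- role_tpfpfn_stats[r][c] += 1
def pvIncr (stats : List (List Int)) (r : Nat) (c : Nat) : List (List Int) :=
  stats.modify r (fun row => row.modify c (· + 1))

-- 'for role_idx, arg_tup in enumerate(record): if arg_tup is not None: stats[role_idx][c] += 1'
-- (the enumerate counter is the explicit index r)
def pvA_recLoop (c : Nat) (stats : List (List Int)) (r : Nat) : List (Option String) → List (List Int)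
  | [] => stats
  | a :: rest => pvA_recLoop c (if a.isSome then pvIncr stats r c else stats) (r + 1) rest

-- the body of A's 'for role_idx, (pred_arg, gold_arg) in enumerate(zip(...))'
def pvCellStep (stats : List (List Int)) (r : Nat) (pa ga : Option String) : List (List Int) :=
  match ga with
  | none =>
    match pa with
    | some _ => pvIncr stats r 1
    | none => stats
  | some gv =>
    match pa with
    | none => pvIncr stats r 2
    | some pv => if pv = gv then pvIncr stats r 0 else pvIncr (pvIncr stats r 1) r 2

def pvA_pairLoop (stats : List (List Int)) (r : Nat) : List (Option String × Option String) → List (List Int)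
  | [] => stats
  | (pa, ga) :: rest => pvA_pairLoop (pvCellStep stats r pa ga) (r + 1) rest

-- A's 'while len(pred_records) > 0 and len(gold_records) > 0' loop; returns the stats and
-- the remaining pred_records / gold_records.  best record via max(golds, key=sim), its
-- index via list.index; the .getD defaults are unreachable (the list is nonempty and the
-- max? result is a member).
def pvA_loop : List (List (Option String)) → List (List (Option String)) → List (List Int) →
    List (List Int) × List (List (Option String)) × List (List (Option String))
  | [], golds, stats => (stats, [], golds)
  | p :: rest, [], stats => (stats, p :: rest, [])
  | p :: rest, g0 :: gs, stats =>
    let golds := g0 :: gs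
    let bestRec := (PySem.List.max? golds (fun gr => pvSim p gr)).getD g0
    let bestIdx := (PySem.List.index? golds bestRec).getD 0
    let goldRec := (PySem.List.pyGet? golds (bestIdx : Int)).getD g0
    let stats' := pvA_pairLoop stats 0 (p.zip goldRec)
    pvA_loop rest (golds.eraseIdx bestIdx) stats'

def pvA_event (pred_records gold_records : Option (List (List (Option String)))) (role_num : Int) :
    List (List Int) :=
  let stats0 := (PySem.List.pyRange 0 role_num 1).map (fun _ => ([0, 0, 0] : List Int))
  match gold_records with
  | none =>
    match pred_records with
    | some preds => preds.foldl (fun s rec => pvA_recLoop 1 s 0 rec) stats0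
    | none => stats0
  | some golds =>
    match pred_records with
    | none => golds.foldl (fun s rec => pvA_recLoop 2 s 0 rec) stats0
    | some preds =>
      let sp := PySem.List.sorted preds (fun x => pvNonNone x) true
      let res := pvA_loop sp golds stats0
      let stats2 := res.2.1.foldl (fun s rec => pvA_recLoop 1 s 0 rec) res.1
      res.2.2.foldl (fun s rec => pvA_recLoop 2 s 0 rec) stats2

-- 'for event_idx, (pred_records, gold_records) in enumerate(zip(...)): ... append(...)'
def pvA_top (nums : List Int) (i : Nat) (acc : List (List (List Int))) :
    List (Option (List (List (Option String))) × Option (List (List (Option String)))) →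
    List (List (List Int))
  | [] => acc
  | (p, g) :: rest =>
    pvA_top nums (i + 1) (acc ++ [pvA_event p g ((PySem.List.pyGet? nums (i : Int)).getD 0)]) rest

def agg_ins_event_role_tpfpfn_stats (pred_record_mat : List (Option (List (List (Option String))))) (gold_record_mat : List (Option (List (List (Option String))))) (event_role_num_list : List Int) : List (List (List Int)) :=
  pvA_top event_role_num_list 0 [] (pred_record_mat.zip gold_record_mat)

-- ===== PORT B =====
-- _cell(pa, ga): the [tp, fp, fn] 3-vector of one argument pair
def pvBCell (pa ga : Option String) : List Int :=
  [ if pa.isSome = true ∧ pa = ga then 1 else 0,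
    if pa.isSome = true ∧ pa ≠ ga then 1 else 0,
    if ga.isSome = true ∧ pa ≠ ga then 1 else 0 ]

-- key of 'max(range(len(golds)), key=lambda i: sum(1 for pa, ga in zip(p, golds[i]) if pa == ga))'
def pvBSimAt (p : List (Option String)) (golds : List (List (Option String))) (i : Int) : Int :=
  (((p.zip ((PySem.List.pyGet? golds i).getD [])).countP (fun z => z.1 == z.2)) : Int)

-- one iteration of the 'for p in sorted(...)' loop of _greedy_pairs
def pvBStep (blank : List (Option String))
    (st : List (List (Option String) × List (Option String)) × List (List (Option String)))
    (p : List (Option String)) :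
    List (List (Option String) × List (Option String)) × List (List (Option String)) :=
  match st.2 with
  | [] => (st.1 ++ [(p, blank)], [])
  | g0 :: gs =>
    let golds := g0 :: gs
    let j := (PySem.List.max? (PySem.List.pyRange 0 (golds.length : Int) 1)
               (fun i => pvBSimAt p golds i)).getD 0
    (st.1 ++ [(p, (PySem.List.pyGet? golds j).getD blank)],
     PySem.List.slice golds none (some j) ++ PySem.List.slice golds (some (j + 1)) none)

-- _greedy_pairs(preds, golds, k)
def pvBPairs (preds golds : Option (List (List (Option String)))) (k : Int) :
    List (List (Option String) × List (Option String)) :=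
  let blank : List (Option String) := List.replicate k.toNat none
  let res := (PySem.List.sorted (preds.getD [])
      (fun rec => ((rec.countP (fun a => a.isSome)) : Int)) true).foldl (pvBStep blank) ([], golds.getD [])
  res.1 ++ res.2.map (fun g => (blank, g))

-- the body of B's main loop: pairs once, then the nested sum comprehension
def pvBEvent (preds golds : Option (List (List (Option String)))) (k : Int) :
    List (List Int) :=
  let pairs := pvBPairs preds golds k
  (PySem.List.pyRange 0 k 1).map (fun r =>
    (PySem.List.pyRange 0 3 1).map (fun j =>
      (pairs.map (fun pg =>
        (PySem.List.pyGet? (pvBCell ((PySem.List.pyGet? pg.1 r).getD none)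
          ((PySem.List.pyGet? pg.2 r).getD none)) j).getD 0)).sum))

def agg_ins_event_role_tpfpfn_stats_alt (pred_record_mat : List (Option (List (List (Option String))))) (gold_record_mat : List (Option (List (List (Option String))))) (event_role_num_list : List Int) : List (List (List Int)) :=
  (PySem.List.enumerate (pred_record_mat.zip gold_record_mat)).map (fun e =>
    pvBEvent e.2.1 e.2.2 ((PySem.List.pyGet? event_role_num_list e.1).getD 0))

-- ===== PRECONDITION & SPEC =====
-- every record of a present (non-None) record list has exactly k roles
def pvRecsOK (k : Int) (recs : Option (List (List (Option String)))) : Bool :=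
  (recs.getD []).all (fun rec => (rec.length : Int) == k)

-- Pre_ excludes the inputs on which A raises (mismatched outer lengths: AssertionError;
-- too short event_role_num_list: IndexError; a record whose length differs from its
-- event's role_num: AssertionError on every record A's asserts reach) and, with them, the
-- corner where such a wrong-length gold record escapes A's asserts by being greedily
-- matched (A silently zip-truncates it and returns, B's direct indexing raises).
def Pre_agg_ins_event_role_tpfpfn_stats (pred_record_mat : List (Option (List (List (Option String))))) (gold_record_mat : List (Option (List (List (Option String))))) (event_role_num_list : List Int) : Prop :=
  pred_record_mat.length = gold_record_mat.length ∧
  pred_record_mat.length ≤ event_role_num_list.length ∧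
  ∀ i, i < pred_record_mat.length →
    (pred_record_mat[i]?.getD none = none ∧ gold_record_mat[i]?.getD none = none) ∨
    (pvRecsOK (event_role_num_list[i]?.getD 0) (pred_record_mat[i]?.getD none) = true ∧
     pvRecsOK (event_role_num_list[i]?.getD 0) (gold_record_mat[i]?.getD none) = true)

instance (pred_record_mat : List (Option (List (List (Option String))))) (gold_record_mat : List (Option (List (List (Option String))))) (event_role_num_list : List Int) : Decidable (Pre_agg_ins_event_role_tpfpfn_stats pred_record_mat gold_record_mat event_role_num_list) := by unfold Pre_agg_ins_event_role_tpfpfn_stats; infer_instance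

def pvWitness_agg_ins_event_role_tpfpfn_stats : List (Option (List (List (Option String)))) × List (Option (List (List (Option String)))) × List Int :=
  ([some [[some "a"]], none], [some [[some "b"]], none], [1, 0])

def Spec_agg_ins_event_role_tpfpfn_stats (pred_record_mat : List (Option (List (List (Option String))))) (gold_record_mat : List (Option (List (List (Option String))))) (event_role_num_list : List Int) (out : List (List (List Int))) : Prop := out = agg_ins_event_role_tpfpfn_stats_alt pred_record_mat gold_record_mat event_role_num_list
instance (pred_record_mat : List (Option (List (List (Option String))))) (gold_record_mat : List (Option (List (List (Option String))))) (event_role_num_list : List Int) (out : List (List (List Int))) : Decidable (Spec_agg_ins_event_role_tpfpfn_stats pred_record_mat gold_record_mat event_role_num_list out) := by unfold Spec_agg_ins_event_role_tpfpfn_stats; infer_instance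

-- ===== CLAIM (what is proved, stated in full; the proofs are below) =====
def Claim_equal_agg_ins_event_role_tpfpfn_stats : Prop := ∀ (pred_record_mat : List (Option (List (List (Option String))))) (gold_record_mat : List (Option (List (List (Option String))))) (event_role_num_list : List Int), Dom_agg_ins_event_role_tpfpfn_stats pred_record_mat gold_record_mat event_role_num_list → Pre_agg_ins_event_role_tpfpfn_stats pred_record_mat gold_record_mat event_role_num_list → Spec_agg_ins_event_role_tpfpfn_stats pred_record_mat gold_record_mat event_role_num_list (agg_ins_event_role_tpfpfn_stats pred_record_mat gold_record_mat event_role_num_list)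

-- ===== LEMMAS AND PROOFS =====

-- the per-cell TP/FP/FN contribution of one pair at one role
def pvCellT (pa ga : Option String) : Int × Int × Int :=
  match pa, ga with
  | some pv, some gv => if pv = gv then (1, 0, 0) else (0, 1, 1)
  | some _, none => (0, 1, 0)
  | none, some _ => (0, 0, 1)
  | none, none => (0, 0, 0)

def pvRowAdd (row : List Int) (t : Int × Int × Int) : List Int :=
  match row with
  | [a, b, c] => [a + t.1, b + t.2.1, c + t.2.2]
  | _ => row

def pvAdd3 (s t : Int × Int × Int) : Int × Int × Int := (s.1 + t.1, s.2.1 + t.2.1, s.2.2 + t.2.2)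

def pvAddMat (stats : List (List Int)) (cols : List (Int × Int × Int)) : List (List Int) :=
  List.zipWith pvRowAdd stats cols

def pvPairUpd (stats : List (List Int)) (pg : List (Option String) × List (Option String)) :
    List (List Int) :=
  pvA_pairLoop stats 0 (pg.1.zip pg.2)

def pvColsOf (pairs : List (List (Option String) × List (Option String))) (n : Nat) :
    List (Int × Int × Int) :=
  (List.range n).map (fun r =>
    (pairs.map (fun pg => pvCellT (pg.1.getD r none) (pg.2.getD r none))).foldr pvAdd3 (0, 0, 0))

def pvTriple (stats : List (List Int)) : Prop := ∀ row ∈ stats, row.length = 3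

-- modify at the append boundary
theorem pvModify_append (s1 : List (List Int)) (row : List Int) (s2 : List (List Int))
    (f : List Int → List Int) :
    (s1 ++ row :: s2).modify s1.length f = s1 ++ f row :: s2 := by
  induction s1 with
  | nil => simp [List.modify]
  | cons x s1 ih => simpa [List.modify] using ih

-- one step of the pair loop at the append boundary, on a well-formed row
theorem pvIncr_append (s1 : List (List Int)) (row : List Int) (s2 : List (List Int)) (c : Nat) :
    pvIncr (s1 ++ row :: s2) s1.length c = s1 ++ row.modify c (· + 1) :: s2 := by
  unfold pvIncr; exact pvModify_append s1 row s2 _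

theorem pvCellStep_append (s1 : List (List Int)) (row : List Int) (s2 : List (List Int))
    (pa ga : Option String) (hrow : row.length = 3) :
    pvCellStep (s1 ++ row :: s2) s1.length pa ga =
      s1 ++ pvRowAdd row (pvCellT pa ga) :: s2 := by
  obtain ⟨a, b, c, rfl⟩ := List.length_eq_three.mp hrow
  cases pa with
  | none =>
    cases ga with
    | none => simp [pvCellStep, pvCellT, pvRowAdd]
    | some gv =>
      show pvIncr _ _ 2 = _
      rw [pvIncr_append]; simp [pvCellT, pvRowAdd, List.modify]
  | some pv =>
    cases ga with
    | none =>
      show pvIncr _ _ 1 = _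
      rw [pvIncr_append]; simp [pvCellT, pvRowAdd, List.modify]
    | some gv =>
      by_cases hpg : pv = gv
      · show (if pv = gv then pvIncr _ _ 0 else _) = _
        rw [if_pos hpg, pvIncr_append]; simp [pvCellT, pvRowAdd, List.modify, hpg]
      · show (if pv = gv then _ else pvIncr (pvIncr _ _ 1) _ 2) = _
        rw [if_neg hpg, pvIncr_append]
        have : (s1 ++ [a, b, c].modify 1 (· + 1) :: s2) = s1 ++ [a, b + 1, c] :: s2 := by
          simp [List.modify]
        rw [this, pvIncr_append]; simp [pvCellT, pvRowAdd, List.modify, hpg]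

theorem pvPairLoop_append (zs : List (Option String × Option String)) :
    ∀ (s1 s2 : List (List Int)), zs.length = s2.length → pvTriple s2 →
    pvA_pairLoop (s1 ++ s2) s1.length zs =
      s1 ++ List.zipWith pvRowAdd s2 (zs.map (fun z => pvCellT z.1 z.2)) := by
  induction zs with
  | nil =>
    intro s1 s2 h _
    have : s2 = [] := by cases s2 <;> simp_all
    subst this; simp [pvA_pairLoop]
  | cons z rest ih =>
    intro s1 s2 h ht
    obtain ⟨pa, ga⟩ := z
    cases s2 with
    | nil => simp at h
    | cons row s2' =>
      have hrow : row.length = 3 := ht row (by simp)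
      have ht' : pvTriple s2' := fun r hr => ht r (by simp [hr])
      have h' : rest.length = s2'.length := by simpa using h
      calc pvA_pairLoop (s1 ++ row :: s2') s1.length ((pa, ga) :: rest)
          = pvA_pairLoop (pvCellStep (s1 ++ row :: s2') s1.length pa ga) (s1.length + 1) rest := rfl
        _ = pvA_pairLoop ((s1 ++ [pvRowAdd row (pvCellT pa ga)]) ++ s2')
              (s1 ++ [pvRowAdd row (pvCellT pa ga)]).length rest := by
              rw [pvCellStep_append s1 row s2' pa ga hrow]; simp
        _ = (s1 ++ [pvRowAdd row (pvCellT pa ga)]) ++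
              List.zipWith pvRowAdd s2' (rest.map (fun z => pvCellT z.1 z.2)) := ih _ _ h' ht'
        _ = s1 ++ List.zipWith pvRowAdd (row :: s2') (((pa, ga) :: rest).map (fun z => pvCellT z.1 z.2)) := by
              simp

theorem pvPairUpd_eq (stats : List (List Int)) (pg : List (Option String) × List (Option String))
    (h : (pg.1.zip pg.2).length = stats.length) (ht : pvTriple stats) :
    pvPairUpd stats pg = pvAddMat stats ((pg.1.zip pg.2).map (fun z => pvCellT z.1 z.2)) := by
  have := pvPairLoop_append (pg.1.zip pg.2) [] stats h ht
  simpa [pvPairUpd, pvAddMat] using this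

theorem pvAddMat_length (stats : List (List Int)) (cols : List (Int × Int × Int))
    (h : cols.length = stats.length) : (pvAddMat stats cols).length = stats.length := by
  simp [pvAddMat, h]

theorem pvAddMat_triple (stats : List (List Int)) (cols : List (Int × Int × Int))
    (ht : pvTriple stats) : pvTriple (pvAddMat stats cols) := by
  unfold pvAddMat
  induction stats generalizing cols with
  | nil => intro row hr; simp at hr
  | cons x t ih =>
    cases cols with
    | nil => intro row hr; simp at hr
    | cons c cs =>
      intro row hr
      rcases List.mem_cons.mp hr with h | h
      · subst h
        have hx : x.length = 3 := ht x (by simp)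
        obtain ⟨a, b, c', rfl⟩ := List.length_eq_three.mp hx
        simp [pvRowAdd]
      · exact ih cs (fun r hrr => ht r (List.mem_cons_of_mem _ hrr)) row h

theorem pvAddMat_zero (stats : List (List Int)) (n : Nat) (h : stats.length = n)
    (ht : pvTriple stats) : pvAddMat stats (pvColsOf [] n) = stats := by
  subst h
  have hz : ∀ c ∈ pvColsOf [] stats.length, c = ((0, 0, 0) : Int × Int × Int) := by
    intro c hc
    simp only [pvColsOf, List.map_nil, List.foldr_nil, List.mem_map] at hc
    obtain ⟨r, _, rfl⟩ := hc; rfl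
  have hlen : (pvColsOf [] stats.length).length = stats.length := by simp [pvColsOf]
  unfold pvAddMat
  revert hz hlen
  generalize pvColsOf [] stats.length = cols
  induction stats generalizing cols with
  | nil => intro _ _; simp
  | cons x t ih =>
    intro hz hlen
    cases cols with
    | nil => simp at hlen
    | cons c cs =>
      have hx : x.length = 3 := ht x (by simp)
      obtain ⟨a, b, c', rfl⟩ := List.length_eq_three.mp hx
      have hc0 : c = (0, 0, 0) := hz c (by simp)
      subst hc0
      simp only [List.zipWith_cons_cons, List.cons.injEq]
      refine ⟨by simp [pvRowAdd], ?_⟩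
      exact ih (fun r hr => ht r (by simp [hr])) cs (fun d hd => hz d (by simp [hd])) (by simpa using hlen)

theorem pvAddMat_addMat (stats : List (List Int)) (c1 c2 : List (Int × Int × Int)) :
    pvAddMat (pvAddMat stats c1) c2 = pvAddMat stats (List.zipWith pvAdd3 c1 c2) := by
  unfold pvAddMat
  induction stats generalizing c1 c2 with
  | nil => simp
  | cons x t ih =>
    cases c1 with
    | nil => simp
    | cons u c1' =>
      cases c2 with
      | nil => simp
      | cons v c2' =>
        simp only [List.zipWith_cons_cons, List.cons.injEq]
        refine ⟨?_, ih c1' c2'⟩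
        obtain ⟨u1, u2, u3⟩ := u
        obtain ⟨v1, v2, v3⟩ := v
        rcases x with _ | ⟨a, _ | ⟨b, _ | ⟨c, _ | ⟨d, rest⟩⟩⟩⟩ <;>
          simp [pvRowAdd, pvAdd3, add_assoc]

theorem pvColsOf_cons (pg : List (Option String) × List (Option String))
    (pairs : List (List (Option String) × List (Option String))) (n : Nat)
    (h1 : pg.1.length = n) (h2 : pg.2.length = n) :
    pvColsOf (pg :: pairs) n =
      List.zipWith pvAdd3 ((pg.1.zip pg.2).map (fun z => pvCellT z.1 z.2)) (pvColsOf pairs n) := by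
  apply List.ext_getElem
  · simp [pvColsOf, List.length_zip, h1, h2]
  · intro r hr hr'
    have hrn : r < n := by simpa [pvColsOf] using hr
    have hr1 : r < pg.1.length := by omega
    have hr2 : r < pg.2.length := by omega
    simp [pvColsOf, List.getElem_zipWith, List.getElem_map, List.getElem_range,
      List.getElem_zip, List.getD_eq_getElem?_getD, hr1, hr2,
      pvAdd3]

theorem pvFold_pairUpd (pairs : List (List (Option String) × List (Option String))) :
    ∀ (stats : List (List Int)) (n : Nat), stats.length = n → pvTriple stats →
    (∀ pg ∈ pairs, pg.1.length = n ∧ pg.2.length = n) →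
    pairs.foldl pvPairUpd stats = pvAddMat stats (pvColsOf pairs n) := by
  induction pairs with
  | nil => intro stats n hs ht _; exact (pvAddMat_zero stats n hs ht).symm
  | cons pg pairs ih =>
    intro stats n hs ht hl
    obtain ⟨h1, h2⟩ := hl pg (by simp)
    have hzip : (pg.1.zip pg.2).length = stats.length := by
      simp [List.length_zip, h1, h2, hs]
    have hupd := pvPairUpd_eq stats pg hzip ht
    have hc1len : ((pg.1.zip pg.2).map (fun z => pvCellT z.1 z.2)).length = stats.length := by
      simpa using hzip
    have hlen' : (pvPairUpd stats pg).length = n := by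
      rw [hupd]; rw [pvAddMat_length _ _ hc1len]; exact hs
    have ht' : pvTriple (pvPairUpd stats pg) := by
      rw [hupd]; exact pvAddMat_triple _ _ ht
    have hl' : ∀ q ∈ pairs, q.1.length = n ∧ q.2.length = n := fun q hq => hl q (by simp [hq])
    calc (pg :: pairs).foldl pvPairUpd stats
        = pairs.foldl pvPairUpd (pvPairUpd stats pg) := rfl
      _ = pvAddMat (pvPairUpd stats pg) (pvColsOf pairs n) := ih _ _ hlen' ht' hl'
      _ = pvAddMat (pvAddMat stats ((pg.1.zip pg.2).map (fun z => pvCellT z.1 z.2))) (pvColsOf pairs n) := by rw [hupd]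
      _ = pvAddMat stats (List.zipWith pvAdd3 ((pg.1.zip pg.2).map (fun z => pvCellT z.1 z.2)) (pvColsOf pairs n)) := pvAddMat_addMat _ _ _
      _ = pvAddMat stats (pvColsOf (pg :: pairs) n) := by rw [pvColsOf_cons pg pairs n h1 h2]

-- one-sided record loops are pair-updates against an all-None record
theorem pvRecLoop1_eq (rec : List (Option String)) :
    ∀ (stats : List (List Int)) (r m : Nat), rec.length ≤ m →
    pvA_recLoop 1 stats r rec = pvA_pairLoop stats r (rec.zip (List.replicate m none)) := by
  induction rec with
  | nil => intro stats r m _; rfl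
  | cons a rest ih =>
    intro stats r m hm
    cases m with
    | zero => simp at hm
    | succ m' =>
      have hrep : List.replicate (m' + 1) (none : Option String) = none :: List.replicate m' none := rfl
      rw [hrep, List.zip_cons_cons]
      show pvA_recLoop 1 (if a.isSome then pvIncr stats r 1 else stats) (r + 1) rest =
        pvA_pairLoop (pvCellStep stats r a none) (r + 1) (rest.zip (List.replicate m' none))
      cases a <;> simp only [pvCellStep, Option.isSome, if_true] <;>
        exact ih _ _ _ (by simpa using hm)

theorem pvRecLoop2_eq (rec : List (Option String)) :
    ∀ (stats : List (List Int)) (r m : Nat), rec.length ≤ m →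
    pvA_recLoop 2 stats r rec = pvA_pairLoop stats r ((List.replicate m (none : Option String)).zip rec) := by
  induction rec with
  | nil => intro stats r m _; cases m <;> rfl
  | cons a rest ih =>
    intro stats r m hm
    cases m with
    | zero => simp at hm
    | succ m' =>
      have hrep : List.replicate (m' + 1) (none : Option String) = none :: List.replicate m' none := rfl
      rw [hrep, List.zip_cons_cons]
      show pvA_recLoop 2 (if a.isSome then pvIncr stats r 2 else stats) (r + 1) rest =
        pvA_pairLoop (pvCellStep stats r none a) (r + 1) ((List.replicate m' none).zip rest)
      cases a <;> simp only [pvCellStep, Option.isSome, if_true] <;>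
        exact ih _ _ _ (by simpa using hm)

-- folds of one-sided record loops as pair-update folds
theorem pvFoldRec1_eq (m : Nat) (preds : List (List (Option String)))
    (h : ∀ p ∈ preds, p.length ≤ m) :
    ∀ s, preds.foldl (fun s rec => pvA_recLoop 1 s 0 rec) s =
      (preds.map (fun p => (p, List.replicate m (none : Option String)))).foldl pvPairUpd s := by
  induction preds with
  | nil => intro s; rfl
  | cons p rest ih =>
    intro s
    rw [List.map_cons, List.foldl_cons, List.foldl_cons]
    rw [show pvPairUpd s (p, List.replicate m (none : Option String)) =
        pvA_pairLoop s 0 (p.zip (List.replicate m none)) from rfl]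
    rw [← pvRecLoop1_eq p s 0 m (h p (by simp))]
    exact ih (fun q hq => h q (by simp [hq])) _

theorem pvFoldRec2_eq (m : Nat) (golds : List (List (Option String)))
    (h : ∀ g ∈ golds, g.length ≤ m) :
    ∀ s, golds.foldl (fun s rec => pvA_recLoop 2 s 0 rec) s =
      (golds.map (fun g => (List.replicate m (none : Option String), g))).foldl pvPairUpd s := by
  induction golds with
  | nil => intro s; rfl
  | cons g rest ih =>
    intro s
    rw [List.map_cons, List.foldl_cons, List.foldl_cons]
    rw [show pvPairUpd s (List.replicate m (none : Option String), g) =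
        pvA_pairLoop s 0 ((List.replicate m none).zip g) from rfl]
    rw [← pvRecLoop2_eq g s 0 m (h g (by simp))]
    exact ih (fun q hq => h q (by simp [hq])) _

-- the running first-max kept by A's max(..., key=...) fold and by B's max over range
theorem pvFoldlMax_first {α : Type} (key : α → Int) (t : List α) :
    ∀ m : α, ∃ j : Nat, ∃ hj : j < (m :: t).length,
      (m :: t)[j] = t.foldl (fun acc x => if key acc < key x then x else acc) m ∧
      (∀ i, ∀ hi : i < (m :: t).length, i < j → key (m :: t)[i] < key (m :: t)[j]) ∧
      (∀ i, ∀ hi : i < (m :: t).length, key (m :: t)[i] ≤ key (m :: t)[j]) := by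
  induction t with
  | nil =>
    intro m
    refine ⟨0, by simp, rfl, by omega, ?_⟩
    intro i hi
    have h0 : i = 0 := by simp at hi; omega
    subst h0
    exact le_refl _
  | cons x t' ih =>
    intro m
    by_cases hmx : key m < key x
    · obtain ⟨j', hj', heq, hstrict, hmax⟩ := ih x
      refine ⟨j' + 1, by simpa using hj', by simpa [hmx] using heq, ?_, ?_⟩
      · intro i hi hij
        cases i with
        | zero =>
          have h0 : key x ≤ key ((x :: t')[j']) := by simpa using hmax 0 (by simp)
          simp only [List.getElem_cons_zero, List.getElem_cons_succ]
          exact lt_of_lt_of_le hmx h0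
        | succ i' =>
          have := hstrict i' (by simpa using hi) (by omega)
          simpa using this
      · intro i hi
        cases i with
        | zero =>
          have h0 : key x ≤ key ((x :: t')[j']) := by simpa using hmax 0 (by simp)
          simp only [List.getElem_cons_zero, List.getElem_cons_succ]
          exact le_trans (le_of_lt hmx) h0
        | succ i' => simpa using hmax i' (by simpa using hi)
    · have hxm : key x ≤ key m := by omega
      obtain ⟨j', hj', heq, hstrict, hmax⟩ := ih m
      cases j' with
      | zero =>
        refine ⟨0, by simp, ?_, by omega, ?_⟩
        · simp only [List.getElem_cons_zero] at heq ⊢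
          simp only [List.foldl_cons, if_neg hmx]
          exact heq
        · intro i hi
          cases i with
          | zero => exact le_refl _
          | succ i' =>
            cases i' with
            | zero => simpa using hxm
            | succ i'' =>
              have := hmax (i'' + 1) (by simpa using hi)
              simpa using this
      | succ j'' =>
        refine ⟨j'' + 2, by simpa using hj', ?_, ?_, ?_⟩
        · simp only [List.getElem_cons_succ] at heq ⊢
          rw [List.foldl_cons, if_neg hmx]
          exact heq
        · intro i hi hij
          cases i with
          | zero =>
            have := hstrict 0 (by simp) (by omega)
            simpa using this
          | succ i' =>
            cases i' with
            | zero =>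
              have h0 : key m < key ((m :: t')[j'' + 1]) := by
                simpa using hstrict 0 (by simp) (by omega)
              simp only [List.getElem_cons_succ] at h0 ⊢
              exact lt_of_le_of_lt hxm h0
            | succ i'' =>
              have := hstrict (i'' + 1) (by simpa using hi) (by omega)
              simpa using this
        · intro i hi
          cases i with
          | zero =>
            have := hmax 0 (by simp)
            simpa using this
          | succ i' =>
            cases i' with
            | zero =>
              have h0 : key m ≤ key ((m :: t')[j'' + 1]) := by simpa using hmax 0 (by simp)
              simp only [List.getElem_cons_succ] at h0 ⊢
              exact le_trans hxm h0
            | succ i'' =>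
              have := hmax (i'' + 1) (by simpa using hi)
              simpa using this

-- Python max with a key over a nonempty list is the running first-max fold
theorem pvMax?_cons {α : Type} (key : α → Int) (g0 : α) (gs : List α) :
    PySem.List.max? (g0 :: gs) key =
      some (gs.foldl (fun acc x => if key acc < key x then x else acc) g0) := by
  show List.foldl _ none (g0 :: gs) = _
  rw [List.foldl_cons]
  show List.foldl _ (some g0) gs = _
  induction gs generalizing g0 with
  | nil => rfl
  | cons x gs ih =>
    rw [List.foldl_cons, List.foldl_cons]
    show List.foldl (fun acc x =>
        match acc with
        | none => some x
        | some m => if key m < key x then some x else some m)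
        (if key g0 < key x then some x else some g0) gs =
      some (List.foldl (fun acc x => if key acc < key x then x else acc)
        (if key g0 < key x then x else g0) gs)
    by_cases h : key g0 < key x
    · rw [if_pos h, if_pos h]
      exact ih x
    · rw [if_neg h, if_neg h]
      exact ih g0

-- first occurrence: index? returns j when nothing before j equals L[j]
theorem pvIndex?_first {α : Type} [BEq α] [LawfulBEq α] (L : List α) :
    ∀ j : Nat, ∀ hj : j < L.length,
      (∀ i, ∀ hi : i < L.length, i < j → L[i] ≠ L[j]) →
      PySem.List.index? L L[j] = some j := by
  induction L with
  | nil => intro j hj; simp at hj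
  | cons x t ih =>
    intro j hj hne
    cases j with
    | zero => simpa using PySem.List.index?_cons_self x t
    | succ j' =>
      have hj2 : j' < t.length := by simpa using hj
      simp only [List.getElem_cons_succ]
      have hx : x ≠ t[j'] := by simpa using hne 0 (by simp) (by omega)
      rw [PySem.List.index?_cons_of_ne _ (by simpa using hx)]
      rw [ih j' hj2 (fun i hi hij => by
        simpa using hne (i + 1) (by simpa using hi) (by omega))]
      rfl

-- a sequence has at most one 'first argmax'
theorem pvArgmax_unique (f : Nat → Int) (n j1 j2 : Nat) (h1 : j1 < n) (h2 : j2 < n)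
    (s1 : ∀ i, i < n → i < j1 → f i < f j1) (l1 : ∀ i, i < n → f i ≤ f j1)
    (s2 : ∀ i, i < n → i < j2 → f i < f j2) (l2 : ∀ i, i < n → f i ≤ f j2) : j1 = j2 := by
  by_contra hne
  rcases Nat.lt_or_ge j1 j2 with h | h
  · have := s2 j1 h1 h
    have := l2 j2 h2
    have := l1 j2 h2
    omega
  · have hlt : j2 < j1 := by omega
    have := s1 j2 h2 hlt
    have := l2 j1 h1
    omega

-- A's best gold index (index of max(golds, key=sim)) is the first argmax of the sim sequence
theorem pvBestIdx_spec (p g0 : List (Option String)) (gs : List (List (Option String))) :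
    ∃ j : Nat, ∃ hj : j < (g0 :: gs).length,
      ((PySem.List.index? (g0 :: gs) ((PySem.List.max? (g0 :: gs) (fun gr => pvSim p gr)).getD g0)).getD 0) = j ∧
      (∀ i, ∀ hi : i < (g0 :: gs).length, i < j → pvSim p (g0 :: gs)[i] < pvSim p (g0 :: gs)[j]) ∧
      (∀ i, ∀ hi : i < (g0 :: gs).length, pvSim p (g0 :: gs)[i] ≤ pvSim p (g0 :: gs)[j]) := by
  obtain ⟨j, hj, hMj, hstrict, hmax⟩ := pvFoldlMax_first (fun gr => pvSim p gr) gs g0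
  refine ⟨j, hj, ?_, hstrict, hmax⟩
  rw [pvMax?_cons]
  simp only [Option.getD_some]
  rw [← hMj]
  rw [pvIndex?_first (g0 :: gs) j hj (fun i hi hij heq => by
    have := hstrict i hi hij
    rw [heq] at this
    exact lt_irrefl _ this)]
  rfl

-- B's index-key sim agrees with A's record-key sim at in-range indices
theorem pvBSimAt_eq (p : List (Option String)) (golds : List (List (Option String)))
    (i : Nat) (hi : i < golds.length) :
    pvBSimAt p golds (i : Int) = pvSim p golds[i] := by
  unfold pvBSimAt pvSim
  rw [PySem.List.pyGet?_natCast, List.getElem?_eq_getElem hi]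
  simp only [Option.getD_some, List.countP_eq_length_filter]
  congr 2
  apply List.filter_congr
  intro z _
  by_cases h : z.1 = z.2 <;> simp [h]

-- B's max over range(len(golds)) picks the same index as A's index(max(golds, key=sim))
theorem pvBArgmax_eq (p g0 : List (Option String)) (gs : List (List (Option String))) :
    ∃ j : Nat, ∃ hj : j < (g0 :: gs).length,
      ((PySem.List.index? (g0 :: gs) ((PySem.List.max? (g0 :: gs) (fun gr => pvSim p gr)).getD g0)).getD 0) = j ∧
      (PySem.List.max? (PySem.List.pyRange 0 (((g0 :: gs).length : Nat) : Int) 1)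
        (fun i => pvBSimAt p (g0 :: gs) i)).getD 0 = (j : Int) := by
  obtain ⟨jA, hjA, hAeq, hAs, hAl⟩ := pvBestIdx_spec p g0 gs
  have hnpos : (0 : Int) < ((g0 :: gs).length : Int) := by
    exact_mod_cast Nat.succ_pos gs.length
  have hcons : PySem.List.pyRange 0 ((g0 :: gs).length : Int) 1 =
      0 :: PySem.List.pyRange 1 ((g0 :: gs).length : Int) 1 := by
    simpa using PySem.List.pyRange_one_cons hnpos
  obtain ⟨jB, hjB, hBeq, hBs, hBl⟩ :=
    pvFoldlMax_first (fun i => pvBSimAt p (g0 :: gs) i)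
      (PySem.List.pyRange 1 ((g0 :: gs).length : Int) 1) 0
  have hLlen : ((0 : Int) :: PySem.List.pyRange 1 ((g0 :: gs).length : Int) 1).length =
      (g0 :: gs).length := by
    rw [← hcons, PySem.List.length_pyRange_one]
    omega
  have hLget : ∀ i : Nat, ∀ hi : i < (PySem.List.pyRange 0 ((g0 :: gs).length : Int) 1).length,
      ((0 : Int) :: PySem.List.pyRange 1 ((g0 :: gs).length : Int) 1)[i]'(by rw [← hcons]; exact hi) = (i : Int) := by
    intro i hi
    rw [← List.getElem_of_eq hcons hi]
    rw [PySem.List.getElem_pyRange_one]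
    omega
  have hjB' : jB < (g0 :: gs).length := by rw [← hLlen]; exact hjB
  have hjBr : jB < (PySem.List.pyRange 0 ((g0 :: gs).length : Int) 1).length := by
    rw [hcons]; exact hjB
  have hjeq : jA = jB := by
    apply pvArgmax_unique
      (fun i => if h : i < (g0 :: gs).length then pvSim p ((g0 :: gs)[i]'h) else 0)
      (g0 :: gs).length jA jB hjA hjB'
    · intro i hi hij
      simp only [dif_pos hi, dif_pos hjA]
      exact hAs i hi hij
    · intro i hi
      simp only [dif_pos hi, dif_pos hjA]
      exact hAl i hi
    · intro i hi hij
      have hir : i < (PySem.List.pyRange 0 ((g0 :: gs).length : Int) 1).length := by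
        rw [PySem.List.length_pyRange_one]; omega
      have h1 := hBs i (by rw [hLlen]; exact hi) hij
      simp only [dif_pos hi, dif_pos hjB']
      rw [← pvBSimAt_eq p (g0 :: gs) i hi, ← pvBSimAt_eq p (g0 :: gs) jB hjB']
      rw [← hLget i hir, ← hLget jB hjBr]
      exact h1
    · intro i hi
      have hir : i < (PySem.List.pyRange 0 ((g0 :: gs).length : Int) 1).length := by
        rw [PySem.List.length_pyRange_one]; omega
      have h1 := hBl i (by rw [hLlen]; exact hi)
      simp only [dif_pos hi, dif_pos hjB']
      rw [← pvBSimAt_eq p (g0 :: gs) i hi, ← pvBSimAt_eq p (g0 :: gs) jB hjB']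
      rw [← hLget i hir, ← hLget jB hjBr]
      exact h1
  refine ⟨jA, hjA, hAeq, ?_⟩
  rw [show (((g0 :: gs).length : Nat) : Int) = ((g0 :: gs).length : Int) from rfl]
  rw [hcons, pvMax?_cons]
  simp only [Option.getD_some]
  rw [← hBeq, hLget jB hjBr, hjeq]

-- the greedy matching: matched pairs and both leftovers (proof-side; A's index expressions)
def pvM : List (List (Option String)) → List (List (Option String)) →
    List (List (Option String) × List (Option String)) × List (List (Option String)) × List (List (Option String))
  | [], gs => ([], [], gs)
  | p :: rest, [] => ([], p :: rest, [])
  | p :: rest, g0 :: gs =>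
    let golds := g0 :: gs
    let bestIdx := (PySem.List.index? golds ((PySem.List.max? golds (fun gr => pvSim p gr)).getD g0)).getD 0
    let goldRec := (PySem.List.pyGet? golds (bestIdx : Int)).getD g0
    let res := pvM rest (golds.eraseIdx bestIdx)
    ((p, goldRec) :: res.1, res.2.1, res.2.2)

theorem pvM_nil_golds (sp : List (List (Option String))) : pvM sp [] = ([], sp, []) := by
  cases sp <;> rfl

-- A's while loop is the fold of pair updates over the matched pairs
theorem pvA_loop_eq (preds : List (List (Option String))) :
    ∀ (golds : List (List (Option String))) (stats : List (List Int)),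
    pvA_loop preds golds stats =
      ((pvM preds golds).1.foldl pvPairUpd stats, (pvM preds golds).2.1, (pvM preds golds).2.2) := by
  induction preds with
  | nil => intro golds stats; rfl
  | cons p rest ih =>
    intro golds stats
    cases golds with
    | nil => rfl
    | cons g0 gs =>
      show pvA_loop rest _ _ = _
      rw [ih]
      rfl

theorem pvM_mem (preds : List (List (Option String))) :
    ∀ (golds : List (List (Option String))),
    (∀ pg ∈ (pvM preds golds).1, pg.1 ∈ preds ∧ pg.2 ∈ golds) ∧
    (∀ p ∈ (pvM preds golds).2.1, p ∈ preds) ∧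
    (∀ g ∈ (pvM preds golds).2.2, g ∈ golds) := by
  induction preds with
  | nil =>
    intro golds
    exact ⟨by simp [pvM], by simp [pvM], by simp [pvM]⟩
  | cons p rest ih =>
    intro golds
    cases golds with
    | nil =>
      refine ⟨by simp [pvM], ?_, by simp [pvM]⟩
      intro q hq
      simpa [pvM] using hq
    | cons g0 gs =>
      obtain ⟨j, hj, hA, _, _⟩ := pvBestIdx_spec p g0 gs
      have hget : (PySem.List.pyGet? (g0 :: gs) ((j : Nat) : Int)).getD g0 = (g0 :: gs)[j] := by
        rw [PySem.List.pyGet?_natCast, List.getElem?_eq_getElem hj]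
        rfl
      have hstep : pvM (p :: rest) (g0 :: gs) =
          ((p, (g0 :: gs)[j]) :: (pvM rest ((g0 :: gs).eraseIdx j)).1,
           (pvM rest ((g0 :: gs).eraseIdx j)).2.1,
           (pvM rest ((g0 :: gs).eraseIdx j)).2.2) := by
        show ((p, (PySem.List.pyGet? (g0 :: gs) (((PySem.List.index? (g0 :: gs) ((PySem.List.max? (g0 :: gs) (fun gr => pvSim p gr)).getD g0)).getD 0 : Nat) : Int)).getD g0) :: _, _, _) = _
        rw [hA, hget]
      obtain ⟨ihm, ihp, ihg⟩ := ih ((g0 :: gs).eraseIdx j)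
      rw [hstep]
      refine ⟨?_, ?_, ?_⟩
      · intro pg hpg
        rcases List.mem_cons.mp hpg with h | h
        · subst h
          exact ⟨by simp, List.getElem_mem hj⟩
        · obtain ⟨h1, h2⟩ := ihm pg h
          exact ⟨List.mem_cons_of_mem _ h1, List.eraseIdx_subset h2⟩
      · intro q hq
        exact List.mem_cons_of_mem _ (ihp q hq)
      · intro g hg
        exact List.eraseIdx_subset (ihg g hg)

-- B's fold over the sorted preds builds exactly those pairs, padding leftover preds
theorem pvBFold_eq (blank : List (Option String)) (sp : List (List (Option String))) :
    ∀ (gs : List (List (Option String))) (acc : List (List (Option String) × List (Option String))),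
    sp.foldl (pvBStep blank) (acc, gs) =
      (acc ++ (pvM sp gs).1 ++ (pvM sp gs).2.1.map (fun p => (p, blank)), (pvM sp gs).2.2) := by
  induction sp with
  | nil =>
    intro gs acc
    simp [pvM]
  | cons p rest ih =>
    intro gs acc
    cases gs with
    | nil =>
      rw [List.foldl_cons]
      have hstep : pvBStep blank (acc, []) p = (acc ++ [(p, blank)], []) := rfl
      rw [hstep, ih [], pvM_nil_golds, pvM_nil_golds]
      simp
    | cons g0 gs' =>
      obtain ⟨j, hj, hA, hB⟩ := pvBArgmax_eq p g0 gs'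
      have hget : (PySem.List.pyGet? (g0 :: gs') ((j : Nat) : Int)).getD blank = (g0 :: gs')[j] := by
        rw [PySem.List.pyGet?_natCast, List.getElem?_eq_getElem hj]
        rfl
      have hgetA : (PySem.List.pyGet? (g0 :: gs') ((j : Nat) : Int)).getD g0 = (g0 :: gs')[j] := by
        rw [PySem.List.pyGet?_natCast, List.getElem?_eq_getElem hj]
        rfl
      have hslice : PySem.List.slice (g0 :: gs') none (some ((j : Nat) : Int)) ++
          PySem.List.slice (g0 :: gs') (some (((j : Nat) : Int) + 1)) none =
          (g0 :: gs').eraseIdx j := by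
        rw [PySem.List.slice_to_natCast]
        rw [show (((j : Nat) : Int) + 1) = (((j + 1 : Nat)) : Int) from by push_cast; ring]
        rw [PySem.List.slice_from_natCast]
        rw [List.eraseIdx_eq_take_drop_succ]
      have hstep : pvBStep blank (acc, g0 :: gs') p =
          (acc ++ [(p, (g0 :: gs')[j])], (g0 :: gs').eraseIdx j) := by
        show (acc ++ [(p, (PySem.List.pyGet? (g0 :: gs') ((PySem.List.max? (PySem.List.pyRange 0 ((g0 :: gs').length : Int) 1) (fun i => pvBSimAt p (g0 :: gs') i)).getD 0)).getD blank)],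
              PySem.List.slice (g0 :: gs') none (some ((PySem.List.max? (PySem.List.pyRange 0 ((g0 :: gs').length : Int) 1) (fun i => pvBSimAt p (g0 :: gs') i)).getD 0)) ++
              PySem.List.slice (g0 :: gs') (some ((PySem.List.max? (PySem.List.pyRange 0 ((g0 :: gs').length : Int) 1) (fun i => pvBSimAt p (g0 :: gs') i)).getD 0 + 1)) none) = _
        rw [hB, hget, hslice]
      have hMstep : pvM (p :: rest) (g0 :: gs') =
          ((p, (g0 :: gs')[j]) :: (pvM rest ((g0 :: gs').eraseIdx j)).1,
           (pvM rest ((g0 :: gs').eraseIdx j)).2.1,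
           (pvM rest ((g0 :: gs').eraseIdx j)).2.2) := by
        show ((p, (PySem.List.pyGet? (g0 :: gs') (((PySem.List.index? (g0 :: gs') ((PySem.List.max? (g0 :: gs') (fun gr => pvSim p gr)).getD g0)).getD 0 : Nat) : Int)).getD g0) :: _, _, _) = _
        rw [hA, hgetA]
      rw [List.foldl_cons, hstep, ih ((g0 :: gs').eraseIdx j), hMstep]
      simp

-- pvBPairs with its lets inlined (definitional)
theorem pvBPairs_eq (preds golds : Option (List (List (Option String)))) (k : Int) :
    pvBPairs preds golds k =
      ((PySem.List.sorted (preds.getD [])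
        (fun rec => ((rec.countP (fun a => a.isSome)) : Int)) true).foldl
          (pvBStep (List.replicate k.toNat none)) ([], golds.getD [])).1 ++
      ((PySem.List.sorted (preds.getD [])
        (fun rec => ((rec.countP (fun a => a.isSome)) : Int)) true).foldl
          (pvBStep (List.replicate k.toNat none)) ([], golds.getD [])).2.map
        (fun g => (List.replicate k.toNat none, g)) := rfl

-- foldr of componentwise addition is the triple of column sums
theorem pvFoldrAdd3_proj {α : Type} (f : α → Int × Int × Int) (l : List α) :
    (l.map f).foldr pvAdd3 (0, 0, 0) =
      ((l.map (fun x => (f x).1)).sum, (l.map (fun x => (f x).2.1)).sum, (l.map (fun x => (f x).2.2)).sum) := by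
  induction l with
  | nil => rfl
  | cons x t ih => simp [pvAdd3, ih]

-- column totals only depend on the multiset of pairs
theorem pvColsOf_perm (p1 p2 : List (List (Option String) × List (Option String))) (n : Nat)
    (h : p1.Perm p2) : pvColsOf p1 n = pvColsOf p2 n := by
  unfold pvColsOf
  apply List.map_congr_left
  intro r _
  rw [pvFoldrAdd3_proj, pvFoldrAdd3_proj]
  refine congrArg₂ Prod.mk ?_ (congrArg₂ Prod.mk ?_ ?_) <;>
    exact List.Perm.sum_eq (List.Perm.map _ h)

-- B's 3-vector cell lists the components of the A-side cell triple
theorem pvBCell_eq (pa ga : Option String) :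
    pvBCell pa ga = [(pvCellT pa ga).1, (pvCellT pa ga).2.1, (pvCellT pa ga).2.2] := by
  cases pa with
  | none => cases ga <;> simp [pvBCell, pvCellT]
  | some pv =>
    cases ga with
    | none => simp [pvBCell, pvCellT]
    | some gv =>
      by_cases h : pv = gv <;> simp [pvBCell, pvCellT, h]

-- one row of B's comprehension equals the A-side column total at that role
theorem pvBRow_eq (pairs : List (List (Option String) × List (Option String))) (n : Nat)
    (r : Nat) (hr : r < n)
    (hl : ∀ pg ∈ pairs, pg.1.length = n ∧ pg.2.length = n) :
    (PySem.List.pyRange 0 3 1).map (fun j =>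
      (pairs.map (fun pg =>
        (PySem.List.pyGet? (pvBCell ((PySem.List.pyGet? pg.1 (r : Int)).getD none)
          ((PySem.List.pyGet? pg.2 (r : Int)).getD none)) j).getD 0)).sum) =
    pvRowAdd [0, 0, 0]
      ((pairs.map (fun pg => pvCellT (pg.1.getD r none) (pg.2.getD r none))).foldr pvAdd3 (0, 0, 0)) := by
  have h3 : PySem.List.pyRange 0 3 1 = [0, 1, 2] := by decide
  rw [h3, pvFoldrAdd3_proj]
  have hcell : ∀ pg ∈ pairs, ∀ j : Int,
      (PySem.List.pyGet? (pvBCell ((PySem.List.pyGet? pg.1 (r : Int)).getD none)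
        ((PySem.List.pyGet? pg.2 (r : Int)).getD none)) j).getD 0 =
      (PySem.List.pyGet? [(pvCellT (pg.1.getD r none) (pg.2.getD r none)).1,
        (pvCellT (pg.1.getD r none) (pg.2.getD r none)).2.1,
        (pvCellT (pg.1.getD r none) (pg.2.getD r none)).2.2] j).getD 0 := by
    intro pg hpg j
    obtain ⟨h1, h2⟩ := hl pg hpg
    have hr1 : r < pg.1.length := by omega
    have hr2 : r < pg.2.length := by omega
    have e1 : (PySem.List.pyGet? pg.1 (r : Int)).getD none = pg.1.getD r none := by
      rw [PySem.List.pyGet?_natCast, List.getElem?_eq_getElem hr1, List.getD_eq_getElem _ _ hr1]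
      rfl
    have e2 : (PySem.List.pyGet? pg.2 (r : Int)).getD none = pg.2.getD r none := by
      rw [PySem.List.pyGet?_natCast, List.getElem?_eq_getElem hr2, List.getD_eq_getElem _ _ hr2]
      rfl
    rw [e1, e2, pvBCell_eq]
  simp only [List.map_cons, List.map_nil, pvRowAdd]
  refine List.ext_getElem (by simp) ?_
  intro i hi _
  have hi3 : i < 3 := by simpa using hi
  interval_cases i <;>
    · simp only [List.getElem_cons_zero, List.getElem_cons_succ, zero_add]
      refine congrArg List.sum ?_
      apply List.map_congr_left
      intro pg hpg
      rw [hcell pg hpg]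
      simp [PySem.List.pyGet?, PySem.List.pyIdx?]

theorem pvRecsOK_len (k : Int) (recs : List (List (Option String)))
    (h : pvRecsOK k (some recs) = true) : ∀ p ∈ recs, p.length = k.toNat := by
  intro p hp
  have := by simpa [pvRecsOK, List.all_eq_true] using h
  have hpk : (p.length : Int) = k := by
    have h2 := this p hp
    exact_mod_cast h2
  omega

-- the B-side final matrix from any pair list with well-formed components
theorem pvBFinal_eq (pairs : List (List (Option String) × List (Option String))) (k : Int)
    (hl : ∀ pg ∈ pairs, pg.1.length = k.toNat ∧ pg.2.length = k.toNat) :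
    pairs.foldl pvPairUpd ((PySem.List.pyRange 0 k 1).map (fun _ => ([0, 0, 0] : List Int))) =
    (PySem.List.pyRange 0 k 1).map (fun r =>
      (PySem.List.pyRange 0 3 1).map (fun j =>
        (pairs.map (fun pg =>
          (PySem.List.pyGet? (pvBCell ((PySem.List.pyGet? pg.1 r).getD none)
            ((PySem.List.pyGet? pg.2 r).getD none)) j).getD 0)).sum)) := by
  have hstats0len : ((PySem.List.pyRange 0 k 1).map (fun _ => ([0, 0, 0] : List Int))).length = k.toNat := by
    simp [PySem.List.length_pyRange_one]
  have ht0 : pvTriple ((PySem.List.pyRange 0 k 1).map (fun _ => ([0, 0, 0] : List Int))) := by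
    intro row hrow
    simp only [List.mem_map] at hrow
    obtain ⟨_, _, hr⟩ := hrow
    rw [← hr]
    rfl
  rw [pvFold_pairUpd pairs _ k.toNat hstats0len ht0 hl]
  apply List.ext_getElem
  · simp [pvAddMat, pvColsOf, PySem.List.length_pyRange_one]
  · intro i hi1 hi2
    have hi : i < k.toNat := by
      simpa [pvAddMat, pvColsOf, PySem.List.length_pyRange_one] using hi1
    have hrange : i < (PySem.List.pyRange 0 k 1).length := by
      simpa [PySem.List.length_pyRange_one] using hi
    have hcols : i < (pvColsOf pairs k.toNat).length := by simp [pvColsOf, hi]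
    rw [show (pvAddMat ((PySem.List.pyRange 0 k 1).map (fun _ => ([0, 0, 0] : List Int)))
          (pvColsOf pairs k.toNat))[i]'hi1 =
        pvRowAdd (((PySem.List.pyRange 0 k 1).map (fun _ => ([0, 0, 0] : List Int)))[i]'(by
          simpa [hstats0len] using hi))
          ((pvColsOf pairs k.toNat)[i]'hcols) from by
      simp [pvAddMat]]
    rw [List.getElem_map]
    rw [show ((PySem.List.pyRange 0 k 1).map (fun r =>
        (PySem.List.pyRange 0 3 1).map (fun j =>
          (pairs.map (fun pg =>
            (PySem.List.pyGet? (pvBCell ((PySem.List.pyGet? pg.1 r).getD none)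
              ((PySem.List.pyGet? pg.2 r).getD none)) j).getD 0)).sum)))[i]'hi2 =
        (PySem.List.pyRange 0 3 1).map (fun j =>
          (pairs.map (fun pg =>
            (PySem.List.pyGet? (pvBCell ((PySem.List.pyGet? pg.1 ((PySem.List.pyRange 0 k 1)[i]'hrange)).getD none)
              ((PySem.List.pyGet? pg.2 ((PySem.List.pyRange 0 k 1)[i]'hrange)).getD none)) j).getD 0)).sum) from by simp]
    rw [PySem.List.getElem_pyRange_one]
    rw [show ((0 : Int) + (i : Int)) = (i : Int) from by omega]
    rw [pvBRow_eq pairs k.toNat i hi hl]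
    simp [pvColsOf]

theorem pvEvent_eq (preds golds : Option (List (List (Option String)))) (k : Int)
    (h : (preds = none ∧ golds = none) ∨ (pvRecsOK k preds = true ∧ pvRecsOK k golds = true)) :
    pvA_event preds golds k = pvBEvent preds golds k := by
  have hnr : (List.replicate k.toNat (none : Option String)).length = k.toNat := by
    simp
  rcases hpc : preds with _ | ps <;> rcases hgc : golds with _ | gs
  · -- both None: A is stats0, B's pair list is empty
    show (PySem.List.pyRange 0 k 1).map (fun _ => ([0, 0, 0] : List Int)) = _
    unfold pvBEvent
    rw [show pvBPairs none none k = [] from rfl]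
    rw [← pvBFinal_eq [] k (by intro pg hpg; simp at hpg)]
    rfl
  · -- preds None, golds present: FN only
    have hg : pvRecsOK k (some gs) = true := by
      rcases h with ⟨_, h2⟩ | ⟨_, h2⟩
      · exact absurd h2 (by simp [hgc])
      · rw [← hgc]; exact h2
    have hlen : ∀ g ∈ gs, g.length = k.toNat := pvRecsOK_len k gs hg
    have hpairs : pvBPairs none (some gs) k =
        gs.map (fun g => (List.replicate k.toNat (none : Option String), g)) := rfl
    have hl : ∀ pg ∈ gs.map (fun g => (List.replicate k.toNat (none : Option String), g)),
        pg.1.length = k.toNat ∧ pg.2.length = k.toNat := by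
      intro pg hpg
      simp only [List.mem_map] at hpg
      obtain ⟨g, hgm, rfl⟩ := hpg
      exact ⟨hnr, hlen g hgm⟩
    show gs.foldl (fun s rec => pvA_recLoop 2 s 0 rec)
        ((PySem.List.pyRange 0 k 1).map (fun _ => ([0, 0, 0] : List Int))) = _
    rw [pvFoldRec2_eq k.toNat gs (fun g hgm => by rw [hlen g hgm]) _]
    rw [pvBFinal_eq _ k hl]
    unfold pvBEvent
    rw [hpairs]
  · -- golds None, preds present: FP only
    have hp : pvRecsOK k (some ps) = true := by
      rcases h with ⟨h1, _⟩ | ⟨h1, _⟩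
      · exact absurd h1 (by simp [hpc])
      · rw [← hpc]; exact h1
    have hlen : ∀ p ∈ ps, p.length = k.toNat := pvRecsOK_len k ps hp
    have hsortperm : (PySem.List.sorted ps
        (fun rec => ((rec.countP (fun a => a.isSome)) : Int)) true).Perm ps :=
      PySem.List.sorted_perm _ _ _
    have hpairs : pvBPairs (some ps) none k =
        (PySem.List.sorted ps (fun rec => ((rec.countP (fun a => a.isSome)) : Int)) true).map
          (fun p => (p, List.replicate k.toNat (none : Option String))) := by
      rw [pvBPairs_eq]
      rw [show (Option.getD (some ps) ([] : List (List (Option String)))) = ps from rfl,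
          show (Option.getD (none : Option (List (List (Option String)))) ([] : List (List (Option String)))) = [] from rfl]
      rw [pvBFold_eq, pvM_nil_golds]
      simp
    have hl : ∀ pg ∈ (PySem.List.sorted ps
          (fun rec => ((rec.countP (fun a => a.isSome)) : Int)) true).map
          (fun p => (p, List.replicate k.toNat (none : Option String))),
        pg.1.length = k.toNat ∧ pg.2.length = k.toNat := by
      intro pg hpg
      simp only [List.mem_map] at hpg
      obtain ⟨p, hpm, rfl⟩ := hpg
      exact ⟨hlen p (hsortperm.mem_iff.mp hpm), hnr⟩
    have hl0 : ∀ pg ∈ ps.map (fun p => (p, List.replicate k.toNat (none : Option String))),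
        pg.1.length = k.toNat ∧ pg.2.length = k.toNat := by
      intro pg hpg
      simp only [List.mem_map] at hpg
      obtain ⟨p, hpm, rfl⟩ := hpg
      exact ⟨hlen p hpm, hnr⟩
    show ps.foldl (fun s rec => pvA_recLoop 1 s 0 rec)
        ((PySem.List.pyRange 0 k 1).map (fun _ => ([0, 0, 0] : List Int))) = _
    rw [pvFoldRec1_eq k.toNat ps (fun p hpm => by rw [hlen p hpm]) _]
    have hstats0len : ((PySem.List.pyRange 0 k 1).map (fun _ => ([0, 0, 0] : List Int))).length = k.toNat := by
      simp [PySem.List.length_pyRange_one]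
    have ht0 : pvTriple ((PySem.List.pyRange 0 k 1).map (fun _ => ([0, 0, 0] : List Int))) := by
      intro row hrow
      simp only [List.mem_map] at hrow
      obtain ⟨_, _, hr⟩ := hrow
      rw [← hr]
      rfl
    rw [pvFold_pairUpd _ _ k.toNat hstats0len ht0 hl0]
    rw [pvColsOf_perm (ps.map (fun p => (p, List.replicate k.toNat (none : Option String)))) _
      k.toNat (List.Perm.map _ hsortperm.symm)]
    rw [← pvFold_pairUpd _ _ k.toNat hstats0len ht0 hl]
    rw [pvBFinal_eq _ k hl]
    unfold pvBEvent
    rw [hpairs]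
  · -- both present
    have hp : pvRecsOK k (some ps) = true := by
      rcases h with ⟨h1, _⟩ | ⟨h1, _⟩
      · exact absurd h1 (by simp [hpc])
      · rw [← hpc]; exact h1
    have hg : pvRecsOK k (some gs) = true := by
      rcases h with ⟨_, h2⟩ | ⟨_, h2⟩
      · exact absurd h2 (by simp [hgc])
      · rw [← hgc]; exact h2
    have hplen : ∀ p ∈ ps, p.length = k.toNat := pvRecsOK_len k ps hp
    have hglen : ∀ g ∈ gs, g.length = k.toNat := pvRecsOK_len k gs hg
    have hkeys : (fun rec => ((List.countP (fun a => a.isSome) rec) : Int)) =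
        (fun x : List (Option String) => pvNonNone x) := by
      funext rec
      simp [pvNonNone, List.countP_eq_length_filter]
    set sp := PySem.List.sorted ps (fun x => pvNonNone x) true with hsp
    have hspB : PySem.List.sorted ps
        (fun rec => ((rec.countP (fun a => a.isSome)) : Int)) true = sp := by
      rw [hsp, hkeys]
    have hsplen : ∀ p ∈ sp, p.length = k.toNat := by
      intro p hpm
      exact hplen p ((PySem.List.mem_sorted _ _ _ _).mp hpm)
    obtain ⟨hmm, hmp, hmg⟩ := pvM_mem sp gs
    set blank : List (Option String) := List.replicate k.toNat none with hblank
    set pairs := (pvM sp gs).1 ++ (pvM sp gs).2.1.map (fun p => (p, blank)) ++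
        (pvM sp gs).2.2.map (fun g => (blank, g)) with hpairsdef
    have hpairs : pvBPairs (some ps) (some gs) k = pairs := by
      rw [pvBPairs_eq]
      rw [show (Option.getD (some ps) ([] : List (List (Option String)))) = ps from rfl,
          show (Option.getD (some gs) ([] : List (List (Option String)))) = gs from rfl]
      rw [hspB, pvBFold_eq]
      simp [hpairsdef, hblank]
    have hl : ∀ pg ∈ pairs, pg.1.length = k.toNat ∧ pg.2.length = k.toNat := by
      intro pg hpg
      rw [hpairsdef] at hpg
      simp only [List.mem_append, List.mem_map] at hpg
      rcases hpg with (hm | ⟨p, hpm, rfl⟩) | ⟨g, hgm, rfl⟩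
      · obtain ⟨h1, h2⟩ := hmm pg hm
        exact ⟨hsplen pg.1 h1, hglen pg.2 h2⟩
      · exact ⟨hsplen p (hmp p hpm), hnr⟩
      · exact ⟨hnr, hglen g (hmg g hgm)⟩
    show (pvA_loop sp gs ((PySem.List.pyRange 0 k 1).map (fun _ => ([0, 0, 0] : List Int)))).2.2.foldl
          (fun s rec => pvA_recLoop 2 s 0 rec)
        ((pvA_loop sp gs ((PySem.List.pyRange 0 k 1).map (fun _ => ([0, 0, 0] : List Int)))).2.1.foldl
          (fun s rec => pvA_recLoop 1 s 0 rec)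
        (pvA_loop sp gs ((PySem.List.pyRange 0 k 1).map (fun _ => ([0, 0, 0] : List Int)))).1) = _
    rw [pvA_loop_eq]
    rw [pvFoldRec1_eq k.toNat _ (fun p hpm => by rw [hsplen p (hmp p hpm)]) _]
    rw [pvFoldRec2_eq k.toNat _ (fun g hgm => by rw [hglen g (hmg g hgm)]) _]
    rw [← List.foldl_append, ← List.foldl_append]
    rw [← List.append_assoc]
    rw [← hblank, ← hpairsdef]
    rw [pvBFinal_eq pairs k hl]
    unfold pvBEvent
    rw [hpairs]

theorem pvTop_eq (l : List (Option (List (List (Option String))) × Option (List (List (Option String))))) :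
    ∀ (nums : List Int) (i : Nat) (acc : List (List (List Int))),
    (∀ j, ∀ h : j < l.length,
      ((l[j].1 = none ∧ l[j].2 = none) ∨
       (pvRecsOK ((PySem.List.pyGet? nums ((i + j : Nat) : Int)).getD 0) l[j].1 = true ∧
        pvRecsOK ((PySem.List.pyGet? nums ((i + j : Nat) : Int)).getD 0) l[j].2 = true))) →
    pvA_top nums i acc l =
      acc ++ (PySem.List.enumerate l ((i : Nat) : Int)).map (fun e =>
        pvBEvent e.2.1 e.2.2 ((PySem.List.pyGet? nums e.1).getD 0)) := by
  induction l with
  | nil => intro nums i acc _; simp [pvA_top, PySem.List.enumerate_nil]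
  | cons pg rest ih =>
    intro nums i acc h
    obtain ⟨p, g⟩ := pg
    have h0 := h 0 (by simp)
    simp only [List.getElem_cons_zero, Nat.add_zero] at h0
    show pvA_top nums (i + 1) (acc ++ [pvA_event p g ((PySem.List.pyGet? nums (i : Int)).getD 0)]) rest = _
    rw [pvEvent_eq p g ((PySem.List.pyGet? nums (i : Int)).getD 0) h0]
    rw [ih nums (i + 1) _ (fun j hj => by
      have heq : i + 1 + j = i + (j + 1) := by omega
      rw [heq]
      simpa using h (j + 1) (by simpa using hj))]
    rw [PySem.List.enumerate_cons]
    rw [show ((i : Nat) : Int) + 1 = (((i + 1 : Nat)) : Int) from by push_cast; ring]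
    simp

-- ===== VERDICT (by name: the statement is the Claim_ definition above) =====
theorem agg_ins_event_role_tpfpfn_stats_spec : Claim_equal_agg_ins_event_role_tpfpfn_stats := by
  intro pm gm nums _ hpre
  obtain ⟨hlen, hnums, hev⟩ := hpre
  unfold Spec_agg_ins_event_role_tpfpfn_stats
  unfold agg_ins_event_role_tpfpfn_stats agg_ins_event_role_tpfpfn_stats_alt
  rw [pvTop_eq _ nums 0 [] ?_]
  · simp
  intro j hj
  have hjz : j < pm.length := by
    simp only [List.length_zip] at hj
    omega
  have hjg : j < gm.length := by omega
  have hz : (pm.zip gm)[j] = (pm[j], gm[j]) := List.getElem_zip ..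
  have hget : (PySem.List.pyGet? nums ((0 + j : Nat) : Int)).getD 0 = nums[j]?.getD 0 := by
    rw [show (0 + j : Nat) = j from by omega, PySem.List.pyGet?_natCast]
  rcases hev j hjz with ⟨h1, h2⟩ | ⟨h1, h2⟩
  · left
    rw [List.getElem?_eq_getElem hjz] at h1
    rw [List.getElem?_eq_getElem hjg] at h2
    simp only [Option.getD_some] at h1 h2
    rw [hz]
    exact ⟨h1, h2⟩
  · right
    rw [List.getElem?_eq_getElem hjz] at h1
    rw [List.getElem?_eq_getElem hjg] at h2
    simp only [Option.getD_some] at h1 h2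
    rw [hz, hget]
    exact ⟨h1, h2⟩
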